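-- pv_equiv track=rewrite | github.com/yukikitayama/leetcode-python | daily-challenge/daily_2802_find_the_k_th_lucky_number.py | kthLuckyNumber
-- ===== SOURCE A (Python) =====
-- def kthLuckyNumber(k: int) -> str:
--     k += 1
--     binary = bin(k)
--     dropped = binary[3:]
--     dropped_list = list(dropped)
--
--     for i in range(len(dropped_list)):
--         if dropped_list[i] == "1":
--             dropped_list[i] = "7"
--         else:
--             dropped_list[i] = "4"
--
--     return "".join(dropped_list)
-- ===== SOURCE B (Python) =====
-- def kthLuckyNumber(k: int) -> str:
--     n = k + 1
--     digits = []
--     while n > 1: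
--         digits.append("7" if n & 1 else "4")
--         n >>= 1
--     return "".join(reversed(digits))
-- ===== Notes on version B (the rewrite author's own statement) =====
-- stated objective: alternative
-- what changed: B extracts the binary digits of k+1 arithmetically LSB-first with a bit loop (n & 1, n >>= 1) and reverses the buffer, instead of A's bin()/string-slicing/indexed in-place replacement pass.
-- outside the precondition, e.g. on kthLuckyNumber(-3): A returns '74', B returns ''
import Mathlib
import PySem

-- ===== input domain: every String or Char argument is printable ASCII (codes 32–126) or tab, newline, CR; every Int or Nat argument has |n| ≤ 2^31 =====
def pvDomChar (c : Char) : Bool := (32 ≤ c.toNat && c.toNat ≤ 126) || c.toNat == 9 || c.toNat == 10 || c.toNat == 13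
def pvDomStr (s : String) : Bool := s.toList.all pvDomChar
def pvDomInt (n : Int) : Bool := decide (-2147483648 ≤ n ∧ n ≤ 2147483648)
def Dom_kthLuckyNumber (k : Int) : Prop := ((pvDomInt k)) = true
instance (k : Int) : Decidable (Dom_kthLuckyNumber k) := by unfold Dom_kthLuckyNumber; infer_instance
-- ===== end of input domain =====

-- B replaces A's bin()/string-slicing with an arithmetic LSB-first bit loop; equivalence proved on k ≥ 0.

-- ===== PORT A =====
-- MSB-first binary digits of n (hand port of the digit part of Python's bin; exact for n ≥ 1)
def pvNatBits (n : Nat) : List Char :=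
  if _h : 2 ≤ n then pvNatBits (n / 2) ++ [if n % 2 = 1 then '1' else '0']
  else [if n % 2 = 1 then '1' else '0']
decreasing_by exact Nat.div_lt_self (by omega) (by omega)

-- hand port of Python's bin(n), as a list of characters (exact for every Int)
def pvBin (n : Int) : List Char :=
  if n = 0 then ['0', 'b', '0']
  else if n < 0 then '-' :: '0' :: 'b' :: pvNatBits (-n).toNat
  else '0' :: 'b' :: pvNatBits n.toNat

def kthLuckyNumber (k : Int) : String :=
  let k1 := k + 1
  let binary := pvBin k1
  let dropped := PySem.List.slice binary (some 3) none
  -- the indexed for-loop rewrites each '1' to '7' and every other char to '4': a map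
  let mapped := dropped.map (fun c => if c = '1' then '7' else '4')
  String.mk mapped

-- ===== PORT B =====
-- while n > 1: collect '7'/'4' for the low bit, n >>= 1  (LSB-first digit buffer)
def pvAltDigits (n : Int) : List Char :=
  if _h : 1 < n then
    (if PySem.Int.mod n 2 = 1 then '7' else '4') :: pvAltDigits (PySem.Int.floordiv n 2)
  else []
termination_by n.toNat
decreasing_by
  rw [PySem.Int.floordiv_eq_ediv_of_pos (by omega)]
  omega

def kthLuckyNumber_alt (k : Int) : String :=
  String.mk (pvAltDigits (k + 1)).reverse

-- ===== PRECONDITION & SPEC =====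
-- Pre_ excludes negative k: the k-th lucky number is unspecified there, and on that corner A and B
-- return different but equally arbitrary values (neither is the behaviour anyone would specify).
def Pre_kthLuckyNumber (k : Int) : Prop := 0 ≤ k
instance (k : Int) : Decidable (Pre_kthLuckyNumber k) := by unfold Pre_kthLuckyNumber; infer_instance
def pvWitness_kthLuckyNumber : Int := (4)

def Spec_kthLuckyNumber (k : Int) (out : String) : Prop := out = kthLuckyNumber_alt k
instance (k : Int) (out : String) : Decidable (Spec_kthLuckyNumber k out) := by unfold Spec_kthLuckyNumber; infer_instance

-- ===== CLAIM (what is proved, stated in full; the proofs are below) =====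
def Claim_equal_kthLuckyNumber : Prop := ∀ (k : Int), Dom_kthLuckyNumber k → Pre_kthLuckyNumber k → Spec_kthLuckyNumber k (kthLuckyNumber k)

-- ===== LEMMAS AND PROOFS =====

theorem pvNatBits_ne_nil (n : Nat) : pvNatBits n ≠ [] := by
  unfold pvNatBits
  split <;> simp

theorem pvAltDigits_pos {n : Int} (h : 1 < n) :
    pvAltDigits n = (if PySem.Int.mod n 2 = 1 then '7' else '4') :: pvAltDigits (PySem.Int.floordiv n 2) := by
  conv_lhs => unfold pvAltDigits
  rw [dif_pos h]

theorem pvAltDigits_le {n : Int} (h : ¬ 1 < n) : pvAltDigits n = [] := by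
  conv_lhs => unfold pvAltDigits
  rw [dif_neg h]

-- the key bridge: dropping the leading bit of the MSB-first digits and mapping 1↦7 / 0↦4
-- is the reverse of B's LSB-first '7'/'4' buffer
theorem pvBits_bridge (n : Nat) (hn : 1 ≤ n) :
    ((pvNatBits n).drop 1).map (fun c => if c = '1' then '7' else '4')
      = (pvAltDigits (n : Int)).reverse := by
  induction n using Nat.strong_induction_on with
  | _ n ih =>
    by_cases h2 : 2 ≤ n
    · rw [pvNatBits, dif_pos h2, pvAltDigits_pos (by exact_mod_cast h2)]
      have hne := pvNatBits_ne_nil (n / 2)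
      rw [List.drop_append_of_le_length (by
        cases hx : pvNatBits (n / 2) with
        | nil => exact absurd hx hne
        | cons a l => simp)]
      rw [List.map_append, ih (n / 2) (Nat.div_lt_self (by omega) (by omega)) (by omega)]
      rw [List.reverse_cons]
      have hmod : PySem.Int.mod (n : Int) 2 = ((n % 2 : Nat) : Int) := by
        exact_mod_cast PySem.Int.mod_natCast n 2
      have hdiv : PySem.Int.floordiv (n : Int) 2 = ((n / 2 : Nat) : Int) := by
        exact_mod_cast PySem.Int.floordiv_natCast n 2
      rw [hdiv, hmod]
      rcases Nat.mod_two_eq_zero_or_one n with h | h <;> simp [h]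
    · have hn1 : n = 1 := by omega
      subst hn1
      rw [pvNatBits, dif_neg (by omega), pvAltDigits_le (by omega)]
      simp

-- ===== VERDICT (by name: the statement is the Claim_ definition above) =====
theorem kthLuckyNumber_spec : Claim_equal_kthLuckyNumber := by
  intro k _ hk
  unfold Pre_kthLuckyNumber at hk
  unfold Spec_kthLuckyNumber kthLuckyNumber kthLuckyNumber_alt
  obtain ⟨n, hn⟩ : ∃ n : Nat, k + 1 = (n : Int) := ⟨(k + 1).toNat, by omega⟩
  have hn1 : 1 ≤ n := by omega
  rw [hn]
  simp only [pvBin, if_neg (show (n : Int) ≠ 0 by exact_mod_cast (by omega : ¬ (n : Int) = 0)),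
    if_neg (show ¬ (n : Int) < 0 by exact_mod_cast (by omega : ¬ (n : Int) < 0))]
  have hslice : PySem.List.slice ('0' :: 'b' :: pvNatBits ((n : Int)).toNat) (some 3) none
      = (pvNatBits ((n : Int)).toNat).drop 1 := by
    have := PySem.List.slice_from_natCast ('0' :: 'b' :: pvNatBits ((n : Int)).toNat) 3
    simpa using this
  rw [hslice]
  have hton : ((n : Int)).toNat = n := by omega
  rw [hton, pvBits_bridge n hn1]
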